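-- pv_equiv track=rewrite | github.com/Julianlo3/TC | Taller 1 grafico/main.py | cerraduraKleene
-- ===== SOURCE A (Python) =====
-- def cerraduraKleene(lista, max_length):
--     # Caso base: La lista vacía está siempre incluida
--     resultado = ['ε']
--
--     # Generar combinaciones de longitud 1 hasta max_length
--     def concatenacionRecu(listas, longitud_actual):
--         # Caso base: si la longitud actual supera el máximo permitido
--         if longitud_actual == 0:
--             return ['']
--
--         # Obtener el resultado de la combinación recursiva
--         listaRecorrer = concatenacionRecu(listas, longitud_actual - 1)
--
--         # Generar nuevas combinaciones concatenando con elementos de la lista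
--         resultado = []
--         for elemento1 in listas:
--             for elemento2 in listaRecorrer:
--                 resultado.append(elemento1 + elemento2)
--         return resultado
--
--     # Para todas las longitudes desde 1 hasta max_length, agregar las combinaciones al resultado
--     for longitud in range(1, max_length + 1):
--         resultado.extend(concatenacionRecu(lista, longitud))
--
--     return resultado
-- ===== SOURCE B (Python) =====
-- def cerraduraKleene(lista, max_length):
--     # Bottom-up: reuse the previous length's strings instead of recomputing
--     # each length from scratch recursively.
--     resultado = ['ε']
--     prev = ['']
--     for _ in range(1, max_length + 1):
--         prev = [e1 + e2 for e1 in lista for e2 in prev]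
--         resultado.extend(prev)
--     return resultado
-- ===== Notes on version B (the rewrite author's own statement) =====
-- stated objective: simpler
-- what changed: Replaces the per-length recursive helper (which rebuilds each length from scratch) with a single bottom-up accumulator loop that extends the previous length's strings once per iteration.
import Mathlib
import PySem

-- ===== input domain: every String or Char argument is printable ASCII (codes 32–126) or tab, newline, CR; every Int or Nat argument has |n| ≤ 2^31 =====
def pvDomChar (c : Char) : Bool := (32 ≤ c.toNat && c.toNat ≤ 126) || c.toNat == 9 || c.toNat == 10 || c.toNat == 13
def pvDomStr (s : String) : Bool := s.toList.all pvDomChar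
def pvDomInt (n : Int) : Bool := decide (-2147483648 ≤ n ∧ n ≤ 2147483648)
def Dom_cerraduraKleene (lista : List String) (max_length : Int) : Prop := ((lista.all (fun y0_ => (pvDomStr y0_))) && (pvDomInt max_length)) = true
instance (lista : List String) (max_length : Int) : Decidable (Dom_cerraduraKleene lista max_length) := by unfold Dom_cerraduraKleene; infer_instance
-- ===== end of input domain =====

-- B replaces A's per-length recursive recomputation by one bottom-up loop reusing the previous length's strings.

-- ===== PORT A =====
-- concatenacionRecu: recursion on longitud_actual (always a nonnegative int, taken as Nat)
def pvRecA (listas : List String) : Nat → List String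
  | 0 => [""]
  | n + 1 =>
    let listaRecorrer := pvRecA listas n
    listas.foldl (fun res e1 => listaRecorrer.foldl (fun res e2 => res ++ [e1 ++ e2]) res) []

def cerraduraKleene (lista : List String) (max_length : Int) : List String :=
  (PySem.List.pyRange 1 (max_length + 1) 1).foldl
    (fun resultado longitud => resultado ++ pvRecA lista longitud.toNat) ["ε"]

-- ===== PORT B =====
def cerraduraKleene_alt (lista : List String) (max_length : Int) : List String :=
  ((PySem.List.pyRange 1 (max_length + 1) 1).foldl
    (fun st _ =>
      let prev := lista.flatMap (fun e1 => st.2.map (fun e2 => e1 ++ e2))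
      (st.1 ++ prev, prev))
    (["ε"], [""])).1

-- ===== PRECONDITION & SPEC =====
def Spec_cerraduraKleene (lista : List String) (max_length : Int) (out : List String) : Prop := out = cerraduraKleene_alt lista max_length
instance (lista : List String) (max_length : Int) (out : List String) : Decidable (Spec_cerraduraKleene lista max_length out) := by unfold Spec_cerraduraKleene; infer_instance

-- ===== CLAIM (what is proved, stated in full; the proofs are below) =====
def Claim_equal_cerraduraKleene : Prop := ∀ (lista : List String) (max_length : Int), Dom_cerraduraKleene lista max_length → Spec_cerraduraKleene lista max_length (cerraduraKleene lista max_length)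

-- ===== LEMMAS AND PROOFS =====

-- A's inner append-one-at-a-time loop equals appending the mapped list.
lemma pvRec_inner (prev : List String) (e1 : String) (acc : List String) :
    prev.foldl (fun res e2 => res ++ [e1 ++ e2]) acc = acc ++ prev.map (fun e2 => e1 ++ e2) := by
  induction prev generalizing acc with
  | nil => simp
  | cons h t ih => simp [List.foldl_cons, ih]

-- A's nested loops equal the flatMap B uses.
lemma pvRec_step (listas prev : List String) (acc : List String) :
    listas.foldl (fun res e1 => prev.foldl (fun res e2 => res ++ [e1 ++ e2]) res) acc
      = acc ++ listas.flatMap (fun e1 => prev.map (fun e2 => e1 ++ e2)) := by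
  induction listas generalizing acc with
  | nil => simp
  | cons h t ih =>
    rw [List.foldl_cons, pvRec_inner, ih, List.flatMap_cons, List.append_assoc]

lemma pvRecA_succ (listas : List String) (n : Nat) :
    pvRecA listas (n + 1) = listas.flatMap (fun e1 => (pvRecA listas n).map (fun e2 => e1 ++ e2)) := by
  simp only [pvRecA]
  rw [pvRec_step, List.nil_append]

-- Main invariant: after n iterations B's state is (A's accumulated result, pvRecA n).
lemma main_inv (lista : List String) (n : Nat) (init : List String) :
    (List.range n).foldl
        (fun (st : List String × List String) (_ : Nat) =>
          let prev := lista.flatMap (fun e1 => st.2.map (fun e2 => e1 ++ e2))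
          (st.1 ++ prev, prev))
        (init, [""])
      = ((List.range n).foldl (fun res k => res ++ pvRecA lista (k + 1)) init, pvRecA lista n) := by
  induction n with
  | zero => simp [pvRecA]
  | succ m ih =>
    rw [List.range_succ, List.foldl_append, List.foldl_append, ih]
    simp [pvRecA_succ]

-- ===== VERDICT (by name: the statement is the Claim_ definition above) =====
theorem cerraduraKleene_spec : Claim_equal_cerraduraKleene := by
  intro lista max_length _
  unfold Spec_cerraduraKleene cerraduraKleene cerraduraKleene_alt
  rw [PySem.List.pyRange_one 1 (max_length + 1)]
  rw [List.foldl_map, List.foldl_map]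
  have h1 : ∀ k : Nat, ((1 : Int) + (k : Int)).toNat = k + 1 := by intro k; omega
  simp only [h1]
  rw [main_inv]
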